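-- pv_equiv track=rewrite | github.com/Sahil-4/dsapractice | Y2025/DECEMBER2025/D012/main.py | _solve
-- ===== SOURCE A (Python) =====
-- def _solve(s: str):
--     ids = []
--     cur = ""
--     for c in s:
--         if c in ("i", "d"):  # original C++ skipped 'i' and 'd' characters
--             continue
--         if c == " ":
--             if cur:
--                 ids.append(int(cur))
--                 cur = ""
--         else:
--             cur += c
--     if cur:
--         ids.append(int(cur))
--     return ids
-- ===== SOURCE B (Python) =====
-- def _solve(s: str):
--     cleaned = s.replace("i", "").replace("d", "")
--     return [int(tok) for tok in cleaned.split(" ") if tok]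
-- ===== Notes on version B (the rewrite author's own statement) =====
-- stated objective: simpler
-- what changed: Replaced the single char-by-char accumulation loop (manual token buffer, flushed at each separator) by a two-pass pipeline: globally delete the two skipped letters with str.replace, then split on the space separator and convert the nonempty tokens in a comprehension.
import Mathlib
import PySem

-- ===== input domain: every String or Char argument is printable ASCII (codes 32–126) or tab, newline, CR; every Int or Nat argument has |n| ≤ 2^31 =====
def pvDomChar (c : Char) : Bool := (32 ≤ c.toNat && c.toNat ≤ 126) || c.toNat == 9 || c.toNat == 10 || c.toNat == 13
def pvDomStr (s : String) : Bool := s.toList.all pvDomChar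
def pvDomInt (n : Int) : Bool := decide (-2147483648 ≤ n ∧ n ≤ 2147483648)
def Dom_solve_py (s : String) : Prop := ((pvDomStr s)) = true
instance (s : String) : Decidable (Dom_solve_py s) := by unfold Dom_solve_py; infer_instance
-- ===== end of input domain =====

-- B replaces A's char-by-char accumulation loop by a simpler two-pass pipeline
-- (global replace of 'i'/'d', then split on ' ' and convert nonempty tokens); return values agree on Pre_.

-- ===== PORT A =====
-- loop body of A's 'for c in s' (state = (ids, cur)); int(cur) → PySem.Int.ofChars?,
-- where parsing fails Python raises ValueError (excluded by Pre_), the port defaults to 0 there.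
def pvStepA (st : List Int × List Char) (c : Char) : List Int × List Char :=
  if c == 'i' || c == 'd' then st
  else if c == ' ' then
    (if st.2.isEmpty then st else (st.1 ++ [(PySem.Int.ofChars? st.2).getD 0], []))
  else (st.1, st.2 ++ [c])

def solve_py (s : String) : List Int :=
  let r := s.toList.foldl pvStepA ([], [])
  if r.2.isEmpty then r.1 else r.1 ++ [(PySem.Int.ofChars? r.2).getD 0]

-- ===== PORT B =====
def solve_py_alt (s : String) : List Int :=
  let cleaned := PySem.Str.replace (PySem.Str.replace s "i" "") "d" ""
  let toks := (PySem.Str.split? cleaned " ").getD []   -- sep = " " ≠ "", so split? is always some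
  (toks.filter (fun t => t != "")).map (fun t => (PySem.Int.ofStr? t).getD 0)

-- ===== PRECONDITION & SPEC =====
-- character kept by the 'i'/'d' deletion (used by Pre_ to name the tokens of s)
def pvKeep (c : Char) : Bool := !(c == 'i') && !(c == 'd')

-- Pre_ excludes exactly the inputs on which Python A raises ValueError:
-- some nonempty token (after deleting 'i'/'d' and splitting on ' ') is not a valid int literal.
def Pre_solve_py (s : String) : Prop :=
  ∀ t ∈ PySem.Chars.splitOn (s.toList.filter pvKeep) [' '],
    t ≠ [] → (PySem.Int.ofChars? t).isSome = true
instance (s : String) : Decidable (Pre_solve_py s) := by unfold Pre_solve_py; infer_instance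

def pvWitness_solve_py : String := "3i4 1d2  -5"

def Spec_solve_py (s : String) (out : List Int) : Prop := out = solve_py_alt s
instance (s : String) (out : List Int) : Decidable (Spec_solve_py s out) := by unfold Spec_solve_py; infer_instance

-- ===== CLAIM (what is proved, stated in full; the proofs are below) =====
def Claim_equal_solve_py : Prop := ∀ (s : String), Dom_solve_py s → Pre_solve_py s → Spec_solve_py s (solve_py s)

-- ===== LEMMAS AND PROOFS =====

def pvParse (t : List Char) : Int := (PySem.Int.ofChars? t).getD 0

-- the shape of splitting on a single character, with a reversed accumulator (mirrors Chars.splitOn.go)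
def pvSplitAux (x : Char) : List Char → List Char → List (List Char)
  | [], cur => [cur.reverse]
  | c :: t, cur => if c == x then cur.reverse :: pvSplitAux x t [] else pvSplitAux x t (c :: cur)

theorem pv_repl_go (x : Char) : ∀ (fuel : Nat) (l acc : List Char), l.length ≤ fuel →
    PySem.Chars.replace.go [x] [] fuel l acc = acc.reverse ++ l.filter (fun c => !(c == x)) := by
  intro fuel
  induction fuel with
  | zero =>
    intro l acc h
    have : l = [] := List.eq_nil_of_length_eq_zero (Nat.le_zero.mp h)
    subst this; simp [PySem.Chars.replace.go]
  | succ f ih =>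
    intro l acc h
    cases l with
    | nil => simp [PySem.Chars.replace.go]
    | cons c t =>
      simp only [PySem.Chars.replace.go]
      by_cases hc : c = x
      · subst hc
        simp only [List.isPrefixOf]
        simp only [List.length_cons, Nat.succ_le_succ_iff] at h
        rw [if_pos (by simp)]
        simp only [List.length_cons, List.length_nil, List.drop_succ_cons, List.drop_zero,
          List.reverse_nil, List.nil_append]
        rw [ih t acc h]
        simp
      · simp only [List.length_cons, Nat.succ_le_succ_iff] at h
        rw [if_neg (by simp [List.isPrefixOf]; exact fun hx => hc (by simp [hx]))]
        rw [ih t (c :: acc) h]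
        simp [hc]

theorem pv_repl_single (x : Char) (l : List Char) :
    PySem.Chars.replace l [x] [] = l.filter (fun c => !(c == x)) := by
  simp only [PySem.Chars.replace, List.isEmpty_cons]
  rw [if_neg (by simp), pv_repl_go x l.length l [] le_rfl]
  simp

theorem pv_split_go (x : Char) : ∀ (fuel : Nat) (l cur : List Char) (acc : List (List Char)), l.length < fuel →
    PySem.Chars.splitOn.go [x] fuel l cur acc = acc.reverse ++ pvSplitAux x l cur := by
  intro fuel
  induction fuel with
  | zero => intro l cur acc h; omega
  | succ f ih =>
    intro l cur acc h
    cases l with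
    | nil => simp [PySem.Chars.splitOn.go, pvSplitAux]
    | cons c t =>
      simp only [PySem.Chars.splitOn.go]
      simp only [List.length_cons, Nat.succ_lt_succ_iff] at h
      by_cases hc : c = x
      · subst hc
        rw [if_pos (by simp [List.isPrefixOf])]
        simp only [List.length_cons, List.length_nil, List.drop_succ_cons, List.drop_zero]
        rw [ih t [] (cur.reverse :: acc) h]
        simp [pvSplitAux]
      · rw [if_neg (by simp [List.isPrefixOf]; exact fun hx => hc (by simp [hx]))]
        rw [ih t (c :: cur) acc h]
        simp [pvSplitAux, hc]

theorem pv_splitOn_single (x : Char) (l : List Char) :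
    PySem.Chars.splitOn l [x] = pvSplitAux x l [] := by
  simp only [PySem.Chars.splitOn]
  rw [pv_split_go x (l.length + 1) l [] [] (Nat.lt_succ_self _)]
  simp

theorem pv_fold_filter : ∀ (l : List Char) (st : List Int × List Char),
    l.foldl pvStepA st = (l.filter pvKeep).foldl pvStepA st := by
  intro l
  induction l with
  | nil => intro st; rfl
  | cons c t ih =>
    intro st
    by_cases hk : pvKeep c = true
    · simp only [List.filter_cons, hk, if_pos, List.foldl_cons, ih]
    · have hid : c = 'i' ∨ c = 'd' := by
        simp [pvKeep] at hk
        by_cases h1 : c = 'i'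
        · exact Or.inl h1
        · exact Or.inr (hk h1)
      have : pvStepA st c = st := by
        rcases hid with h | h <;> subst h <;> simp [pvStepA]
      simp only [List.filter_cons, List.foldl_cons, this, ih]
      have : pvKeep c = false := by rcases hid with h | h <;> subst h <;> rfl
      rw [this]; simp

def pvFinish (r : List Int × List Char) : List Int :=
  if r.2.isEmpty then r.1 else r.1 ++ [pvParse r.2]

theorem pvParse_def (t : List Char) : (PySem.Int.ofChars? t).getD 0 = pvParse t := rfl

theorem pv_main : ∀ (l : List Char) (ids : List Int) (cur : List Char),
    (∀ c ∈ l, pvKeep c = true) →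
    pvFinish (l.foldl pvStepA (ids, cur))
      = ids ++ ((pvSplitAux ' ' l cur.reverse).filter (fun t => !t.isEmpty)).map pvParse := by
  intro l
  induction l with
  | nil =>
    intro ids cur _
    simp only [List.foldl_nil, pvSplitAux, pvFinish, List.reverse_reverse]
    cases cur with
    | nil => simp
    | cons a b => simp [pvParse]
  | cons c t ih =>
    intro ids cur hall
    have hkc : pvKeep c = true := hall c (List.mem_cons_self ..)
    have hallt : ∀ c ∈ t, pvKeep c = true := fun x hx => hall x (List.mem_cons_of_mem _ hx)
    have hci : (c == 'i' || c == 'd') = false := by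
      simp [pvKeep] at hkc; simp [hkc.1, hkc.2]
    by_cases hsp : c = ' '
    · subst hsp
      simp only [List.foldl_cons, pvStepA, hci, Bool.false_eq_true, if_false]
      simp only [pvSplitAux, beq_self_eq_true, if_pos, List.reverse_reverse]
      cases cur with
      | nil =>
        simp only [List.isEmpty_nil, if_pos]
        rw [ih ids [] hallt]
        simp
      | cons a b =>
        simp only [List.isEmpty_cons, Bool.false_eq_true, if_false]
        rw [ih (ids ++ [(PySem.Int.ofChars? (a :: b)).getD 0]) [] hallt]
        simp [pvParse]
    · simp only [List.foldl_cons, pvStepA, hci, Bool.false_eq_true, if_false,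
        if_neg (by simp [hsp] : ¬ (c == ' ') = true)]
      rw [ih ids (cur ++ [c]) hallt]
      simp only [pvSplitAux, if_neg (by simp [hsp] : ¬ (c == ' ') = true)]
      simp

theorem pv_ofList_ne_empty (t : List Char) : (String.ofList t != "") = !t.isEmpty := by
  cases t with
  | nil => rfl
  | cons a b =>
    simp only [List.isEmpty_cons, Bool.not_false, bne_iff_ne, ne_eq]
    intro h
    have : (String.ofList (a :: b)).toList = ("" : String).toList := by rw [h]
    simp at this

-- ===== VERDICT (by name: the statement is the Claim_ definition above) =====
theorem solve_py_spec : Claim_equal_solve_py := by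
  intro s _ _
  simp only [Spec_solve_py, solve_py, solve_py_alt, pvParse_def]
  rw [pv_fold_filter]
  have hmain := pv_main (s.toList.filter pvKeep) [] [] (fun c hc => (List.mem_filter.mp hc).2)
  simp only [pvFinish, List.reverse_nil, List.nil_append] at hmain
  rw [hmain]
  -- now reduce B's String pipeline to the Chars pipeline
  have hclean : (PySem.Str.replace (PySem.Str.replace s "i" "") "d" "").toList
      = s.toList.filter pvKeep := by
    simp only [PySem.Str.toList_replace]
    have hi : ("i" : String).toList = ['i'] := rfl
    have hd : ("d" : String).toList = ['d'] := rfl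
    have he : ("" : String).toList = [] := rfl
    rw [hi, hd, he, pv_repl_single, pv_repl_single, List.filter_filter]
    apply List.filter_congr
    intro c _
    simp [pvKeep, Bool.and_comm]
  simp only [PySem.Str.split?]
  have hsep : (" " : String).toList = [' '] := rfl
  rw [hsep]
  have hsplit : PySem.Chars.split? ((PySem.Str.replace (PySem.Str.replace s "i" "") "d" "").toList) [' ']
      = some (PySem.Chars.splitOn ((PySem.Str.replace (PySem.Str.replace s "i" "") "d" "").toList) [' ']) := by
    simp [PySem.Chars.split?]
  rw [hsplit]
  simp only [hclean, pv_splitOn_single]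
  generalize pvSplitAux ' ' (s.toList.filter pvKeep) [] = ts
  induction ts with
  | nil => rfl
  | cons t ts ihts =>
    cases ht : t.isEmpty with
    | true => simp [pv_ofList_ne_empty, ht, ihts]
    | false => simp [pv_ofList_ne_empty, ht, pvParse, PySem.Int.ofStr?, ihts]
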